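-- pv_equiv track=rewrite | github.com/MahutTimotej/SSBU26 | cv2/mahut_timotej_patient_tasks.py | putInCategory
-- ===== SOURCE A (Python) =====
-- def putInCategory(ages):
--     dictAges = {
--         "minor": 0,
--         "adult": 0,
--         "senior": 0
--     }
--
--     for a in ages:
--         if a < 18:
--             dictAges["minor"] += 1
--         elif a < 65:
--             dictAges["adult"] += 1
--         else:
--             dictAges["senior"] += 1
--
--     return dictAges
-- ===== SOURCE B (Python) =====
-- def putInCategory(ages):
--     ages = list(ages)
--     return {
--         "minor": sum(1 for a in ages if a < 18),
--         "adult": sum(1 for a in ages if 18 <= a < 65),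
--         "senior": sum(1 for a in ages if a >= 65),
--     }
-- ===== Notes on version B (the rewrite author's own statement) =====
-- stated objective: idiomatic
-- what changed: Replaces the single branchy counting loop that mutates a dict with a direct dict literal built from three independent predicate-filtered sums over the list.
import Mathlib
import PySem

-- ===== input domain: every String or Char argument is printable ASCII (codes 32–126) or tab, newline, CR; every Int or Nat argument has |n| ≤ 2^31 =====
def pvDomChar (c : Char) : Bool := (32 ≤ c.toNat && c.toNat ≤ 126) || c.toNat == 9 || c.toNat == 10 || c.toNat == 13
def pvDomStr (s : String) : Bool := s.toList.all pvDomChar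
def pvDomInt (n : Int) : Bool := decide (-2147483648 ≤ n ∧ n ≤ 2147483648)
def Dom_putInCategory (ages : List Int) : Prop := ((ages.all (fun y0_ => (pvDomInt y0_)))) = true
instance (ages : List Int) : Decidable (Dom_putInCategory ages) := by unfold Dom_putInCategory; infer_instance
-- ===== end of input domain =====

-- B builds the result dict directly from three independent predicate counts instead of A's single branchy mutating loop (idiomatic decomposition; same cost).
-- ===== PORT A =====
def putInCategory (ages : List Int) : List (String × Int) :=
  let dictAges : PySem.Dict String Int :=
    ((PySem.Dict.empty.insert "minor" 0).insert "adult" 0).insert "senior" 0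
  let dictAges := ages.foldl (fun d a =>
    if a < 18 then d.modify "minor" 0 (· + 1)
    else if a < 65 then d.modify "adult" 0 (· + 1)
    else d.modify "senior" 0 (· + 1)) dictAges
  dictAges.items

-- ===== PORT B =====
def putInCategory_alt (ages : List Int) : List (String × Int) :=
  [("minor", (ages.countP (fun a => a < 18) : Int)),
   ("adult", (ages.countP (fun a => 18 ≤ a ∧ a < 65) : Int)),
   ("senior", (ages.countP (fun a => 65 ≤ a) : Int))]

-- ===== PRECONDITION & SPEC =====
def Spec_putInCategory (ages : List Int) (out : List (String × Int)) : Prop := out = putInCategory_alt ages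
instance (ages : List Int) (out : List (String × Int)) : Decidable (Spec_putInCategory ages out) := by unfold Spec_putInCategory; infer_instance

-- ===== CLAIM (what is proved, stated in full; the proofs are below) =====
def Claim_equal_putInCategory : Prop := ∀ (ages : List Int), Dom_putInCategory ages → Spec_putInCategory ages (putInCategory ages)

-- ===== LEMMAS AND PROOFS =====

-- ===== VERDICT (by name: the statement is the Claim_ definition above) =====
-- loop invariant: the fold only changes the three counter values, adding the matching counts
lemma putInCategory_loop (ages : List Int) (m ad s : Int) :
    ages.foldl (fun d a =>
      if a < 18 then d.modify "minor" 0 (· + 1)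
      else if a < 65 then d.modify "adult" 0 (· + 1)
      else d.modify "senior" 0 (· + 1))
      (PySem.Dict.mk [("minor", m), ("adult", ad), ("senior", s)]) =
    PySem.Dict.mk [("minor", m + ages.countP (fun a => decide (a < 18))),
      ("adult", ad + ages.countP (fun a => decide (18 ≤ a ∧ a < 65))),
      ("senior", s + ages.countP (fun a => decide (65 ≤ a)))] := by
  induction ages generalizing m ad s with
  | nil => simp
  | cons x xs ih =>
    simp only [List.foldl_cons, List.countP_cons]
    by_cases h1 : x < 18
    · rw [show (if x < 18 then (PySem.Dict.mk [("minor", m), ("adult", ad), ("senior", s)]).modify "minor" 0 (· + 1)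
          else if x < 65 then (PySem.Dict.mk [("minor", m), ("adult", ad), ("senior", s)]).modify "adult" 0 (· + 1)
          else (PySem.Dict.mk [("minor", m), ("adult", ad), ("senior", s)]).modify "senior" 0 (· + 1)) =
          PySem.Dict.mk [("minor", m + 1), ("adult", ad), ("senior", s)] from by
        simp [h1, PySem.Dict.modify, PySem.Dict.get?, PySem.Dict.getD, PySem.Dict.insert], ih]
      simp [h1, show ¬ (18 ≤ x ∧ x < 65) by omega, show ¬ 65 ≤ x by omega,
        PySem.Dict.mk.injEq]
      push_cast; omega
    · by_cases h2 : x < 65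
      · rw [show (if x < 18 then (PySem.Dict.mk [("minor", m), ("adult", ad), ("senior", s)]).modify "minor" 0 (· + 1)
            else if x < 65 then (PySem.Dict.mk [("minor", m), ("adult", ad), ("senior", s)]).modify "adult" 0 (· + 1)
            else (PySem.Dict.mk [("minor", m), ("adult", ad), ("senior", s)]).modify "senior" 0 (· + 1)) =
            PySem.Dict.mk [("minor", m), ("adult", ad + 1), ("senior", s)] from by
          simp [h1, h2, PySem.Dict.modify, PySem.Dict.get?, PySem.Dict.getD, PySem.Dict.insert], ih]
        simp [h1, show (18 ≤ x ∧ x < 65) by omega, show ¬ 65 ≤ x by omega,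
          PySem.Dict.mk.injEq]
        push_cast; omega
      · rw [show (if x < 18 then (PySem.Dict.mk [("minor", m), ("adult", ad), ("senior", s)]).modify "minor" 0 (· + 1)
            else if x < 65 then (PySem.Dict.mk [("minor", m), ("adult", ad), ("senior", s)]).modify "adult" 0 (· + 1)
            else (PySem.Dict.mk [("minor", m), ("adult", ad), ("senior", s)]).modify "senior" 0 (· + 1)) =
            PySem.Dict.mk [("minor", m), ("adult", ad), ("senior", s + 1)] from by
          simp [h1, h2, PySem.Dict.modify, PySem.Dict.get?, PySem.Dict.getD, PySem.Dict.insert], ih]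
        simp [h1, show ¬ (18 ≤ x ∧ x < 65) by omega, show 65 ≤ x by omega,
          PySem.Dict.mk.injEq]
        push_cast; omega

theorem putInCategory_spec : Claim_equal_putInCategory := by
  intro ages _
  unfold Spec_putInCategory putInCategory putInCategory_alt
  show (PySem.Dict.mk [("minor", (0:Int)), ("adult", 0), ("senior", 0)] |> ages.foldl _).items = _
  rw [putInCategory_loop]
  simp [PySem.Dict.items]
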